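-- pv_equiv track=rewrite | github.com/ECouzens/ngraph | tests/transformer_dependent/test_conv.py | pixel_indices
-- ===== SOURCE A (Python) =====
-- import itertools as itt
--
-- def pixel_indices(T, R, S, D, H, W, C, mt, pr, qs):
--     HW = H * W
--     DHW = D * H * W
--     imax = C * DHW
--
--     idx = []
--     for c, t, r, s in itt.product(range(C), range(T), range(R), range(S)):
--
--         ci = c * DHW
--
--         z = mt + t
--         zi = ci + z * HW
--         zb = z >= 0 and z < D
--
--         y = pr + r
--         yi = zi + y * W
--         yb = zb and y >= 0 and y < H
--
--         x = qs + s
--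
--         if yb and x >= 0 and x < W:
--             xi = yi + x
--         else:
--             xi = imax  # out of bounds
--
--         idx.append(xi)
--
--     return idx
-- ===== SOURCE B (Python) =====
-- def pixel_indices(T, R, S, D, H, W, C, mt, pr, qs):
--     HW = H * W
--     DHW = D * H * W
--     imax = C * DHW
--
--     # per-axis tables of Optional offsets (None = out of bounds on that axis)
--     axes = [
--         [(mt + t) * HW if 0 <= mt + t < D else None for t in range(T)],
--         [(pr + r) * W if 0 <= pr + r < H else None for r in range(R)],
--         [qs + s if 0 <= qs + s < W else None for s in range(S)],
--     ]
--
--     # fold the axes into one T*R*S template of Optional combined offsets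
--     tmpl = [0]
--     for ax in axes:
--         tmpl = [a + b if a is not None and b is not None else None
--                 for a in tmpl for b in ax]
--
--     # replicate the template across channels, shifting by c*DHW
--     out = []
--     for c in range(C):
--         ci = c * DHW
--         out.extend(ci + v if v is not None else imax for v in tmpl)
--     return out
-- ===== Notes on version B (the rewrite author's own statement) =====
-- stated objective: alternative
-- what changed: B builds per-axis Optional-offset tables, folds them into a single T*R*S template of combined offsets (None = out of bounds), and then replicates that template across channels with a per-channel shift, instead of A's flat 4-way product loop that recomputes every offset and bounds check per tuple.
import Mathlib
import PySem

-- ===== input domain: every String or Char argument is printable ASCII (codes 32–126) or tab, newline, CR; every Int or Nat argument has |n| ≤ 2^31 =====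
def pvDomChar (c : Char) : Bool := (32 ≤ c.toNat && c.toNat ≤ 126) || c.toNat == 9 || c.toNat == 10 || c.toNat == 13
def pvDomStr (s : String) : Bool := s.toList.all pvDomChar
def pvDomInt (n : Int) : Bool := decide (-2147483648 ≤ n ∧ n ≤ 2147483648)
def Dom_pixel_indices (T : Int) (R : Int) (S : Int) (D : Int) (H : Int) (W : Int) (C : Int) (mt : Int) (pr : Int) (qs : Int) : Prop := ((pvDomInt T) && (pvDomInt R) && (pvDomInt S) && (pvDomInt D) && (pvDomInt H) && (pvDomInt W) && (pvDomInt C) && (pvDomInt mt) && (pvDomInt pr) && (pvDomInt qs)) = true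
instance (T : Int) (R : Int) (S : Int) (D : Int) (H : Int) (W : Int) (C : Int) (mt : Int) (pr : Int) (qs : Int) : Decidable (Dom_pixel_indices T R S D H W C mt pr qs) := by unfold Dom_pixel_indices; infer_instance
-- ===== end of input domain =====

-- B folds per-axis Optional-offset tables into one T*R*S template and replicates it across channels,
-- instead of A's single flat product loop recomputing offsets and bounds inline; return values proved equal everywhere.

-- ===== PORT A =====
-- 'for c,t,r,s in itt.product(...): idx.append(xi)' transliterated as nested flatMap/map over the same ranges, body step for step
def pixel_indices (T : Int) (R : Int) (S : Int) (D : Int) (H : Int) (W : Int) (C : Int) (mt : Int) (pr : Int) (qs : Int) : List Int :=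
  let HW := H * W
  let DHW := D * H * W
  let imax := C * DHW
  (PySem.List.pyRange 0 C 1).flatMap (fun c =>
    (PySem.List.pyRange 0 T 1).flatMap (fun t =>
      (PySem.List.pyRange 0 R 1).flatMap (fun r =>
        (PySem.List.pyRange 0 S 1).map (fun s =>
          let ci := c * DHW
          let z := mt + t
          let zi := ci + z * HW
          let zb := decide (z ≥ 0) && decide (z < D)
          let y := pr + r
          let yi := zi + y * W
          let yb := zb && decide (y ≥ 0) && decide (y < H)
          let x := qs + s
          if yb && decide (x ≥ 0) && decide (x < W) then yi + x else imax))))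

-- ===== PORT B =====
-- 'a + b if a is not None and b is not None else None' combining step of the fold
def pvComb (a b : Option Int) : Option Int :=
  match a, b with
  | some a, some b => some (a + b)
  | _, _ => none

def pixel_indices_alt (T : Int) (R : Int) (S : Int) (D : Int) (H : Int) (W : Int) (C : Int) (mt : Int) (pr : Int) (qs : Int) : List Int :=
  let HW := H * W
  let DHW := D * H * W
  let imax := C * DHW
  let axes : List (List (Option Int)) :=
    [ (PySem.List.pyRange 0 T 1).map (fun t => if decide (0 ≤ mt + t) && decide (mt + t < D) then some ((mt + t) * HW) else none),
      (PySem.List.pyRange 0 R 1).map (fun r => if decide (0 ≤ pr + r) && decide (pr + r < H) then some ((pr + r) * W) else none),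
      (PySem.List.pyRange 0 S 1).map (fun s => if decide (0 ≤ qs + s) && decide (qs + s < W) then some (qs + s) else none) ]
  let tmpl := axes.foldl (fun acc ax => acc.flatMap (fun a => ax.map (fun b => pvComb a b))) [some 0]
  (PySem.List.pyRange 0 C 1).flatMap (fun c =>
    let ci := c * DHW
    tmpl.map (fun v => match v with | some v => ci + v | none => imax))

-- ===== PRECONDITION & SPEC =====
def Spec_pixel_indices (T : Int) (R : Int) (S : Int) (D : Int) (H : Int) (W : Int) (C : Int) (mt : Int) (pr : Int) (qs : Int) (out : List Int) : Prop := out = pixel_indices_alt T R S D H W C mt pr qs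
instance (T : Int) (R : Int) (S : Int) (D : Int) (H : Int) (W : Int) (C : Int) (mt : Int) (pr : Int) (qs : Int) (out : List Int) : Decidable (Spec_pixel_indices T R S D H W C mt pr qs out) := by unfold Spec_pixel_indices; infer_instance

-- ===== CLAIM (what is proved, stated in full; the proofs are below) =====
def Claim_equal_pixel_indices : Prop := ∀ (T : Int) (R : Int) (S : Int) (D : Int) (H : Int) (W : Int) (C : Int) (mt : Int) (pr : Int) (qs : Int), Dom_pixel_indices T R S D H W C mt pr qs → Spec_pixel_indices T R S D H W C mt pr qs (pixel_indices T R S D H W C mt pr qs)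

-- ===== LEMMAS AND PROOFS =====

theorem pv_flatMap_ext {α β : Type} (l : List α) {f g : α → List β} (h : ∀ x, f x = g x) :
    l.flatMap f = l.flatMap g := by rw [funext h]

theorem pv_map_ext {α β : Type} (l : List α) {f g : α → β} (h : ∀ x, f x = g x) :
    l.map f = l.map g := by rw [funext h]

-- ===== VERDICT (by name: the statement is the Claim_ definition above) =====
theorem pixel_indices_spec : Claim_equal_pixel_indices := by
  intro T R S D H W C mt pr qs _
  unfold Spec_pixel_indices pixel_indices pixel_indices_alt
  simp only [List.foldl, List.flatMap_cons, List.flatMap_nil, List.append_nil, List.flatMap_assoc,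
    List.flatMap_map, List.map_map, List.map_flatMap, Function.comp_def]
  refine pv_flatMap_ext _ (fun c => ?_)
  refine pv_flatMap_ext _ (fun t => ?_)
  refine pv_flatMap_ext _ (fun r => ?_)
  refine pv_map_ext _ (fun s => ?_)
  by_cases hz1 : (0:Int) ≤ mt + t <;> by_cases hz2 : mt + t < D <;>
    by_cases hy1 : (0:Int) ≤ pr + r <;> by_cases hy2 : pr + r < H <;>
    by_cases hx1 : (0:Int) ≤ qs + s <;> by_cases hx2 : qs + s < W <;>
    simp [pvComb, hz1, hz2, hy1, hy2, hx1, hx2, ge_iff_le] <;> ring
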